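-- pv_equiv track=rewrite | github.com/Motovis-lab/prefusion_maptrv2 | prefusion/dataset/dataset.py | _prepare_scene_frame_inds
-- ===== SOURCE A (Python) =====
-- from typing import List, Tuple, Dict, Union, TYPE_CHECKING, Sequence
-- from collections import defaultdict
--
-- def _prepare_scene_frame_inds(info: Dict, indices: List[str] = None) -> Dict[str, List[str]]:
--     if indices is None:
--         indices = {}
--         for scene_id in info:
--             frame_list = sorted(info[scene_id]["frame_info"].keys())
--             if frame_list:
--                 indices[scene_id] = [f"{scene_id}/{frame_id}" for frame_id in frame_list]
--         return indices
--
--     available_indices = defaultdict(list)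
--     for index in indices:
--         scene_id, frame_id = index.split("/")
--         if scene_id in info:
--             if frame_id in info[scene_id]["frame_info"]:
--                 available_indices[scene_id].append(index)
--     for scene_id in available_indices:
--         available_indices[scene_id] = sorted(available_indices[scene_id])
--
--     return available_indices
-- ===== SOURCE B (Python) =====
-- from collections import defaultdict
--
--
-- def _insorted_add(lst, x):
--     """Insert x into the sorted list lst (in place), after any equal elements."""
--     i = 0
--     while i < len(lst) and not (x < lst[i]):
--         i += 1
--     lst.insert(i, x)
--
--
-- def _prepare_scene_frame_inds(info, indices=None):
--     if indices is None:
--         return {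
--             scene_id: [f"{scene_id}/{frame_id}" for frame_id in sorted(meta["frame_info"])]
--             for scene_id, meta in info.items()
--             if meta["frame_info"]
--         }
--
--     available_indices = defaultdict(list)
--     for index in indices:
--         scene_id, frame_id = index.split("/")
--         meta = info.get(scene_id)
--         if meta is not None and frame_id in meta["frame_info"]:
--             _insorted_add(available_indices[scene_id], index)
--     return available_indices
-- ===== Notes on version B (the rewrite author's own statement) =====
-- stated objective: alternative
-- what changed: The filtering branch becomes a single grouping pass that keeps each scene's list sorted by inserting every index at its sorted position (no separate per-scene sort loop), and the None branch becomes a dict comprehension over info.items() filtered on the truthiness of frame_info.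
import Mathlib
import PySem

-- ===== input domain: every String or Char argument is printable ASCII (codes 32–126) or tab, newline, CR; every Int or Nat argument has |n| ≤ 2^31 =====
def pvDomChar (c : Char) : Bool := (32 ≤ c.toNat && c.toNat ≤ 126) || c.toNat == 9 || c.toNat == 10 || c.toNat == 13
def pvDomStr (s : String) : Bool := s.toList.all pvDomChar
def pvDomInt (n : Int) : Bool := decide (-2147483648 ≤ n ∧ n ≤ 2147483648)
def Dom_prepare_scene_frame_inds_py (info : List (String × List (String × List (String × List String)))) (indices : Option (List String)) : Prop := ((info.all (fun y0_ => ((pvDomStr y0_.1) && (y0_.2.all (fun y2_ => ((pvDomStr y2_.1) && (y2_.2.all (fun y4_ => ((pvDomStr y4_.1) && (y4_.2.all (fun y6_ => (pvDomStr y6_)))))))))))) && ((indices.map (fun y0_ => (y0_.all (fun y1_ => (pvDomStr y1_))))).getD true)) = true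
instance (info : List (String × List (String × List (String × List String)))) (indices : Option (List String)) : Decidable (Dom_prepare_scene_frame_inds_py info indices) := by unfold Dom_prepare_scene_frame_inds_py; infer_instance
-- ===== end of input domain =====

-- B replaces A's group-then-re-sort filtering loop by a single grouping pass that keeps each
-- scene's list sorted via positional insertion, and A's build-then-test None branch by a dict
-- comprehension (objective: alternative decomposition, same observable result).

-- ===== PORT A =====

-- info[scene_id]["frame_info"] (total form; Pre_ guarantees both keys are present where it is read)
def pvA_frameInfo (info : List (String × List (String × List (String × List String)))) (scene_id : String) : List (String × List String) :=
  ((PySem.Dict.mk (((PySem.Dict.mk info).get? scene_id).getD [])).get? "frame_info").getD []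

def prepare_scene_frame_inds_py (info : List (String × List (String × List (String × List String)))) (indices : Option (List String)) : List (String × List String) :=
  match indices with
  | none =>
      -- indices = {}; for scene_id in info: …
      ((PySem.Dict.mk info).keys.foldl (fun (acc : PySem.Dict String (List String)) scene_id =>
        let frame_list := PySem.List.sorted (PySem.Dict.mk (pvA_frameInfo info scene_id)).keys (fun f => f)
        if frame_list ≠ [] then
          acc.insert scene_id (frame_list.map (fun frame_id => scene_id ++ "/" ++ frame_id))
        else acc) PySem.Dict.empty).items
  | some idxs =>
      -- available_indices = defaultdict(list); for index in indices: …
      let d1 := idxs.foldl (fun (acc : PySem.Dict String (List String)) index =>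
        match PySem.Str.split? index "/" with
        | some [scene_id, frame_id] =>
            if (PySem.Dict.mk info).contains scene_id then
              if (PySem.Dict.mk (pvA_frameInfo info scene_id)).contains frame_id then
                acc.modify scene_id [] (fun v => v ++ [index])
              else acc
            else acc
        | _ => acc  -- Python raises ValueError on unpacking here; excluded by Pre_
        ) PySem.Dict.empty
      -- for scene_id in available_indices: available_indices[scene_id] = sorted(…)
      (d1.keys.foldl (fun (acc : PySem.Dict String (List String)) scene_id =>
        acc.insert scene_id (PySem.List.sorted (acc.getD scene_id []) (fun x => x))) d1).items

-- ===== PORT B =====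

-- B's _insorted_add: scan the sorted list past all elements ≤ x, insert x there
-- (= PySem.List.insertBy with 'x strictly below y' as the stopping test)
def pvB_insort (x : String) (lst : List String) : List String :=
  PySem.List.insertBy (fun a b => decide (a < b)) x lst

def prepare_scene_frame_inds_py_alt (info : List (String × List (String × List (String × List String)))) (indices : Option (List String)) : List (String × List String) :=
  match indices with
  | some idxs =>
      (idxs.foldl (fun (acc : PySem.Dict String (List String)) index =>
        -- 'scene_id, frame_id = index.split("/")', unpacked one constructor at a time;
        -- any shape other than exactly two parts raises ValueError in Python (excluded by Pre_)
        match PySem.Str.split? index "/" with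
        | none => acc
        | some parts =>
          match parts with
          | [] => acc
          | scene_id :: rest =>
            match rest with
            | [] => acc
            | frame_id :: rest2 =>
              match rest2 with
              | _ :: _ => acc
              | [] =>
                match (PySem.Dict.mk info).get? scene_id with
                | some m_ =>
                    if (PySem.Dict.mk (((PySem.Dict.mk m_).get? "frame_info").getD [])).contains frame_id then
                      acc.modify scene_id [] (pvB_insort index)
                    else acc
                | none => acc
        ) PySem.Dict.empty).items
  | none =>
      -- dict comprehension over info.items() filtered on truthiness of meta["frame_info"]
      (PySem.Dict.mk info).items.filterMap (fun p =>
        let fi := ((PySem.Dict.mk p.2).get? "frame_info").getD []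
        if fi ≠ [] then
          some (p.1, (PySem.List.sorted (PySem.Dict.mk fi).keys (fun f => f)).map
                       (fun frame_id => p.1 ++ "/" ++ frame_id))
        else none)

-- ===== PRECONDITION & SPEC =====
-- Pre_ excludes exactly (i) inputs where Python A raises: an index without exactly one '/'
-- (ValueError) or a looked-up scene whose dict lacks "frame_info" (KeyError), and (ii) assoc
-- lists with duplicate top-level keys, which represent no Python dict (dicts have unique keys).
def Pre_prepare_scene_frame_inds_py (info : List (String × List (String × List (String × List String)))) (indices : Option (List String)) : Prop :=
  (info.map Prod.fst).Nodup ∧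
  (match indices with
   | some idxs => idxs.all (fun index =>
       match PySem.Str.split? index "/" with
       | none => false
       | some parts =>
         match parts with
         | [] => false
         | scene_id :: rest =>
           match rest with
           | [] => false
           | _ :: rest2 =>
             match rest2 with
             | _ :: _ => false
             | [] =>
               ((PySem.Dict.mk info).get? scene_id).all (fun m => (PySem.Dict.mk m).contains "frame_info"))
   | none => info.all (fun p => (PySem.Dict.mk p.2).contains "frame_info")) = true
instance (info : List (String × List (String × List (String × List String)))) (indices : Option (List String)) : Decidable (Pre_prepare_scene_frame_inds_py info indices) := by unfold Pre_prepare_scene_frame_inds_py; infer_instance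

def pvWitness_prepare_scene_frame_inds_py : (List (String × List (String × List (String × List String)))) × Option (List String) :=
  ([("s", [("frame_info", [("f1", [])])]), ("t", [("frame_info", [])])], some ["s/f1", "u/x", "s/zz"])

def Spec_prepare_scene_frame_inds_py (info : List (String × List (String × List (String × List String)))) (indices : Option (List String)) (out : List (String × List String)) : Prop := out = prepare_scene_frame_inds_py_alt info indices
instance (info : List (String × List (String × List (String × List String)))) (indices : Option (List String)) (out : List (String × List String)) : Decidable (Spec_prepare_scene_frame_inds_py info indices out) := by unfold Spec_prepare_scene_frame_inds_py; infer_instance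

-- ===== CLAIM (what is proved, stated in full; the proofs are below) =====
def Claim_equal_prepare_scene_frame_inds_py : Prop := ∀ (info : List (String × List (String × List (String × List String)))) (indices : Option (List String)), Dom_prepare_scene_frame_inds_py info indices → Pre_prepare_scene_frame_inds_py info indices → Spec_prepare_scene_frame_inds_py info indices (prepare_scene_frame_inds_py info indices)

-- ===== LEMMAS AND PROOFS =====

-- The common guard of the filtering loops: 'some scene_id' iff the index splits into exactly
-- two parts, its scene is in info and its frame is in that scene's frame_info.
def pvOk (info : List (String × List (String × List (String × List String)))) (index : String) : Option String :=
  match PySem.Str.split? index "/" with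
  | some [scene_id, frame_id] =>
      if (PySem.Dict.mk info).contains scene_id then
        if (PySem.Dict.mk (pvA_frameInfo info scene_id)).contains frame_id then some scene_id
        else none
      else none
  | _ => none

theorem pv_stepA_eq (info : List (String × List (String × List (String × List String))))
    (acc : PySem.Dict String (List String)) (index : String) :
    (match PySem.Str.split? index "/" with
     | some [scene_id, frame_id] =>
         if (PySem.Dict.mk info).contains scene_id then
           if (PySem.Dict.mk (pvA_frameInfo info scene_id)).contains frame_id then
             acc.modify scene_id [] (fun v => v ++ [index])
           else acc
         else acc
     | _ => acc) =
    (match pvOk info index with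
     | some s => acc.modify s [] (fun v => v ++ [index])
     | none => acc) := by
  unfold pvOk
  cases h : PySem.Str.split? index "/" with
  | none => rfl
  | some parts =>
    match parts with
    | [] => rfl
    | [a] => rfl
    | [a, b] => dsimp only; split_ifs <;> rfl
    | a :: b :: c :: t => rfl

theorem pv_stepB_eq (info : List (String × List (String × List (String × List String))))
    (acc : PySem.Dict String (List String)) (index : String) :
    (match PySem.Str.split? index "/" with
     | none => acc
     | some parts =>
       match parts with
       | [] => acc
       | scene_id :: rest =>
         match rest with
         | [] => acc
         | frame_id :: rest2 =>
           match rest2 with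
           | _ :: _ => acc
           | [] =>
             match (PySem.Dict.mk info).get? scene_id with
             | some m_ =>
                 if (PySem.Dict.mk (((PySem.Dict.mk m_).get? "frame_info").getD [])).contains frame_id then
                   acc.modify scene_id [] (pvB_insort index)
                 else acc
             | none => acc) =
    (match pvOk info index with
     | some s => acc.modify s [] (pvB_insort index)
     | none => acc) := by
  unfold pvOk
  cases h : PySem.Str.split? index "/" with
  | none => rfl
  | some parts =>
    match parts with
    | [] => rfl
    | [a] => rfl
    | a :: b :: c :: t => rfl
    | [a, b] =>
      dsimp only
      cases hg : (PySem.Dict.mk info).get? a with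
      | none =>
        have hc : (PySem.Dict.mk info).contains a = false := by
          rw [PySem.Dict.contains_eq_isSome_get?, hg]; rfl
        simp [hc]
      | some m_ =>
        have hc : (PySem.Dict.mk info).contains a = true := by
          rw [PySem.Dict.contains_eq_isSome_get?, hg]; rfl
        have hfi : pvA_frameInfo info a = ((PySem.Dict.mk m_).get? "frame_info").getD [] := by
          unfold pvA_frameInfo; rw [hg]; rfl
        dsimp only
        simp only [hc, if_true, hfi]
        split_ifs <;> rfl

-- the canonical grouping fold
def pvGroup (info : List (String × List (String × List (String × List String))))
    (op : String → List String → List String) (idxs : List String)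
    (d : PySem.Dict String (List String)) : PySem.Dict String (List String) :=
  idxs.foldl (fun acc index =>
    match pvOk info index with
    | some s => acc.modify s [] (op index)
    | none => acc) d

theorem pvGroup_cons (info : List (String × List (String × List (String × List String))))
    (op : String → List String → List String) (x : String) (xs : List String)
    (d : PySem.Dict String (List String)) :
    pvGroup info op (x :: xs) d =
      pvGroup info op xs
        (match pvOk info x with
         | some s => d.modify s [] (op x)
         | none => d) := rfl

theorem pvGroup_keys (info : List (String × List (String × List (String × List String))))
    (op₁ op₂ : String → List String → List String) (idxs : List String)
    (d₁ d₂ : PySem.Dict String (List String)) (h : d₁.keys = d₂.keys) :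
    (pvGroup info op₁ idxs d₁).keys = (pvGroup info op₂ idxs d₂).keys := by
  induction idxs generalizing d₁ d₂ with
  | nil => exact h
  | cons x xs ih =>
    rw [pvGroup_cons, pvGroup_cons]
    apply ih
    cases hok : pvOk info x with
    | none => exact h
    | some s =>
      dsimp only
      rw [PySem.Dict.keys_modify, PySem.Dict.keys_modify]
      by_cases hc : s ∈ d₁.keys
      · rw [PySem.Dict.keys_insert_of_contains _ _ ((PySem.Dict.contains_iff_mem_keys _ _).2 hc),
           PySem.Dict.keys_insert_of_contains _ _ ((PySem.Dict.contains_iff_mem_keys _ _).2 (h ▸ hc)), h]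
      · have hc₁ : d₁.contains s = false := by
          rw [← Bool.not_eq_true, PySem.Dict.contains_iff_mem_keys]; exact hc
        have hc₂ : d₂.contains s = false := by
          rw [← Bool.not_eq_true, PySem.Dict.contains_iff_mem_keys, ← h]; exact hc
        rw [PySem.Dict.keys_insert_of_not_contains _ _ hc₁,
           PySem.Dict.keys_insert_of_not_contains _ _ hc₂, h]

theorem pvGroup_nodup (info : List (String × List (String × List (String × List String))))
    (op : String → List String → List String) (idxs : List String)
    (d : PySem.Dict String (List String)) (h : d.keys.Nodup) :
    (pvGroup info op idxs d).keys.Nodup := by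
  induction idxs generalizing d with
  | nil => exact h
  | cons x xs ih =>
    rw [pvGroup_cons]
    apply ih
    cases hok : pvOk info x with
    | none => exact h
    | some s =>
      dsimp only
      rw [PySem.Dict.keys_modify]
      by_cases hc : d.contains s = true
      · rw [PySem.Dict.keys_insert_of_contains _ _ hc]; exact h
      · have hc' : d.contains s = false := Bool.eq_false_iff.2 hc
        rw [PySem.Dict.keys_insert_of_not_contains _ _ hc']
        have hsk : s ∉ d.keys := fun hm => hc ((PySem.Dict.contains_iff_mem_keys _ _).2 hm)
        simp only [List.nodup_append, h, List.nodup_singleton, true_and]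
        intro a ha b hb
        rw [List.mem_singleton] at hb
        subst hb
        exact fun hab => hsk (hab ▸ ha)

theorem pvGroup_getD (info : List (String × List (String × List (String × List String))))
    (op : String → List String → List String) (idxs : List String)
    (d : PySem.Dict String (List String)) (k : String) :
    (pvGroup info op idxs d).getD k [] =
      (idxs.filter (fun x => pvOk info x == some k)).foldl (fun v x => op x v) (d.getD k []) := by
  induction idxs generalizing d with
  | nil => rfl
  | cons x xs ih =>
    rw [pvGroup_cons]
    simp only [List.filter_cons]
    cases hok : pvOk info x with
    | none =>
      have hbeq : ((none : Option String) == some k) = false := rfl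
      rw [hbeq, if_neg Bool.false_ne_true]
      exact ih d
    | some s =>
      dsimp only
      by_cases hk : s = k
      · subst hk
        have hbeq : (some s == some s) = true := by simp
        rw [hbeq, if_pos rfl]
        simp only [List.foldl_cons]
        rw [ih, PySem.Dict.getD_modify_self]
      · have hbeq : (some s == some k) = false := by simpa using hk
        rw [hbeq]
        simp only [Bool.false_eq_true, if_false]
        rw [ih, PySem.Dict.getD_modify_of_ne _ _ _ (Ne.symm hk)]

theorem pv_resort (ks : List String) (d : PySem.Dict String (List String))
    (hnd : ks.Nodup) (hsub : ∀ k ∈ ks, d.contains k = true) :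
    ((ks.foldl (fun (acc : PySem.Dict String (List String)) scene_id =>
        acc.insert scene_id (PySem.List.sorted (acc.getD scene_id []) (fun x => x))) d).keys = d.keys
      ∧ ∀ k, (ks.foldl (fun (acc : PySem.Dict String (List String)) scene_id =>
        acc.insert scene_id (PySem.List.sorted (acc.getD scene_id []) (fun x => x))) d).getD k []
        = if k ∈ ks then PySem.List.sorted (d.getD k []) (fun x => x) else d.getD k []) := by
  induction ks generalizing d with
  | nil => exact ⟨rfl, fun k => by simp⟩
  | cons s rest ih =>
    simp only [List.foldl_cons]
    have hnd' : rest.Nodup := (List.nodup_cons.1 hnd).2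
    have hs : s ∉ rest := (List.nodup_cons.1 hnd).1
    set d' := d.insert s (PySem.List.sorted (d.getD s []) (fun x => x)) with hd'
    have hkeys' : d'.keys = d.keys :=
      PySem.Dict.keys_insert_of_contains _ _ (hsub s (List.mem_cons_self))
    have hsub' : ∀ k ∈ rest, d'.contains k = true := by
      intro k hk
      rw [PySem.Dict.contains_iff_mem_keys, hkeys', ← PySem.Dict.contains_iff_mem_keys]
      exact hsub k (List.mem_cons_of_mem _ hk)
    obtain ⟨ihk, ihv⟩ := ih d' hnd' hsub'
    refine ⟨ihk.trans hkeys', fun k => ?_⟩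
    rw [ihv k]
    by_cases hk : k ∈ rest
    · have hks : k ≠ s := fun h => hs (h ▸ hk)
      simp only [hk, List.mem_cons, or_true, if_true]
      rw [hd', PySem.Dict.getD_insert, if_neg hks]
    · by_cases hks : k = s
      · subst hks
        simp only [hk, if_false, List.mem_cons, true_or, if_true]
        rw [hd', PySem.Dict.getD_insert, if_pos rfl]
      · simp only [hk, if_false, List.mem_cons, hks, false_or, if_false]
        rw [hd', PySem.Dict.getD_insert, if_neg hks]

-- B's insertion pass over a key's matches builds exactly sorted(matches)
theorem pv_insort_fold (l : List String) :
    l.foldl (fun v x => pvB_insort x v) [] = PySem.List.sorted l (fun x => x) := by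
  rw [PySem.List.sorted_eq_foldl_insertBy]
  rfl

-- A's append pass over a key's matches builds exactly the matches
theorem pv_append_fold (l : List String) :
    l.foldl (fun (v : List String) x => v ++ [x]) [] = l := by
  simpa using PySem.List.foldl_append_singleton_eq_map (fun x : String => x) l []

-- the None branch of A: inserting fresh distinct keys appends
theorem pv_none_fold (V : String → List String) (W : String → List String)
    (ks : List String) (d : PySem.Dict String (List String))
    (hnd : ks.Nodup) (hfresh : ∀ k ∈ ks, d.contains k = false) :
    (ks.foldl (fun (acc : PySem.Dict String (List String)) s =>
        if V s ≠ [] then acc.insert s (W s) else acc) d).items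
      = d.items ++ ks.filterMap (fun s => if V s ≠ [] then some (s, W s) else none) := by
  induction ks generalizing d with
  | nil => simp
  | cons s rest ih =>
    simp only [List.foldl_cons, List.filterMap_cons]
    have hnd' : rest.Nodup := (List.nodup_cons.1 hnd).2
    have hs : s ∉ rest := (List.nodup_cons.1 hnd).1
    by_cases hv : V s ≠ []
    · rw [if_pos hv, if_pos hv]
      have hitems : (d.insert s (W s)).items = d.items ++ [(s, W s)] :=
        PySem.Dict.items_insert_of_not_contains _ _ (hfresh s (List.mem_cons_self))
      have hfresh' : ∀ k ∈ rest, (d.insert s (W s)).contains k = false := by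
        intro k hk
        rw [PySem.Dict.contains_insert]
        have : (k == s) = false := by
          simp only [beq_eq_false_iff_ne, ne_eq]
          exact fun h => hs (h ▸ hk)
        rw [this, Bool.false_or]
        exact hfresh k (List.mem_cons_of_mem _ hk)
      rw [ih _ hnd' hfresh', hitems, List.append_assoc]
      rfl
    · rw [if_neg hv, if_neg hv]
      exact ih d hnd' (fun k hk => hfresh k (List.mem_cons_of_mem _ hk))

-- ===== VERDICT (by name: the statement is the Claim_ definition above) =====
theorem prepare_scene_frame_inds_py_spec : Claim_equal_prepare_scene_frame_inds_py := by
  intro info indices _hdom hpre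
  obtain ⟨hnd, _hshape⟩ := hpre
  unfold Spec_prepare_scene_frame_inds_py
  cases indices with
  | none =>
    -- None branch
    show (prepare_scene_frame_inds_py info none) = prepare_scene_frame_inds_py_alt info none
    unfold prepare_scene_frame_inds_py prepare_scene_frame_inds_py_alt
    simp only
    have hkeys : (PySem.Dict.mk info).keys = info.map Prod.fst := PySem.Dict.keys_mk info
    have hnodup : ((PySem.Dict.mk info).keys).Nodup := by rw [hkeys]; exact hnd
    have hfresh : ∀ k ∈ (PySem.Dict.mk info).keys, (PySem.Dict.empty : PySem.Dict String (List String)).contains k = false := by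
      intro k _; simp [PySem.Dict.contains_empty]
    rw [pv_none_fold
      (fun s => PySem.List.sorted (PySem.Dict.mk (pvA_frameInfo info s)).keys (fun f => f))
      (fun s => (PySem.List.sorted (PySem.Dict.mk (pvA_frameInfo info s)).keys (fun f => f)).map
                  (fun frame_id => s ++ "/" ++ frame_id))
      _ _ hnodup hfresh]
    have hitems : (PySem.Dict.mk info).items = info := rfl
    rw [hkeys]
    have : (info.map Prod.fst).filterMap (fun s =>
        if PySem.List.sorted (PySem.Dict.mk (pvA_frameInfo info s)).keys (fun f => f) ≠ [] then
          some (s, (PySem.List.sorted (PySem.Dict.mk (pvA_frameInfo info s)).keys (fun f => f)).map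
                     (fun frame_id => s ++ "/" ++ frame_id))
        else none)
      = info.filterMap (fun p =>
          let fi := ((PySem.Dict.mk p.2).get? "frame_info").getD []
          if fi ≠ [] then
            some (p.1, (PySem.List.sorted (PySem.Dict.mk fi).keys (fun f => f)).map
                         (fun frame_id => p.1 ++ "/" ++ frame_id))
          else none) := by
      rw [List.filterMap_map]
      apply List.filterMap_congr
      intro p hp
      have hget : (PySem.Dict.mk info).get? p.1 = some p.2 :=
        PySem.Dict.get?_of_mem_items _ (by simpa [hitems] using hp) (by rwa [hkeys])
      have hfi : pvA_frameInfo info p.1 = ((PySem.Dict.mk p.2).get? "frame_info").getD [] := by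
        unfold pvA_frameInfo; rw [hget]; rfl
      simp only [Function.comp_apply, hfi]
      have hguard : (PySem.List.sorted (PySem.Dict.mk (((PySem.Dict.mk p.2).get? "frame_info").getD [])).keys (fun f => f) ≠ [])
          ↔ (((PySem.Dict.mk p.2).get? "frame_info").getD [] ≠ []) := by
        rw [not_iff_not, PySem.List.sorted_eq_nil_iff, PySem.Dict.keys_mk, List.map_eq_nil_iff]
      by_cases hg : ((PySem.Dict.mk p.2).get? "frame_info").getD [] ≠ []
      · rw [if_pos (hguard.2 hg), if_pos hg]
      · rw [if_neg (fun h => hg (hguard.1 h)), if_neg hg]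
    rw [this]
    have hemp : (PySem.Dict.empty : PySem.Dict String (List String)).items = [] := rfl
    rw [hemp, List.nil_append]
  | some idxs =>
    show (prepare_scene_frame_inds_py info (some idxs)) = prepare_scene_frame_inds_py_alt info (some idxs)
    unfold prepare_scene_frame_inds_py prepare_scene_frame_inds_py_alt
    simp only
    -- rewrite both loops into the canonical grouping fold
    have hA : (idxs.foldl (fun (acc : PySem.Dict String (List String)) index =>
        match PySem.Str.split? index "/" with
        | some [scene_id, frame_id] =>
            if (PySem.Dict.mk info).contains scene_id then
              if (PySem.Dict.mk (pvA_frameInfo info scene_id)).contains frame_id then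
                acc.modify scene_id [] (fun v => v ++ [index])
              else acc
            else acc
        | _ => acc) PySem.Dict.empty)
        = pvGroup info (fun index v => v ++ [index]) idxs PySem.Dict.empty := by
      unfold pvGroup
      congr 1
      funext acc index
      exact pv_stepA_eq info acc index
    have hB : (idxs.foldl (fun (acc : PySem.Dict String (List String)) index =>
        match PySem.Str.split? index "/" with
        | none => acc
        | some parts =>
          match parts with
          | [] => acc
          | scene_id :: rest =>
            match rest with
            | [] => acc
            | frame_id :: rest2 =>
              match rest2 with
              | _ :: _ => acc
              | [] =>
                match (PySem.Dict.mk info).get? scene_id with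
                | some m_ =>
                    if (PySem.Dict.mk (((PySem.Dict.mk m_).get? "frame_info").getD [])).contains frame_id then
                      acc.modify scene_id [] (pvB_insort index)
                    else acc
                | none => acc) PySem.Dict.empty)
        = pvGroup info (fun index v => pvB_insort index v) idxs PySem.Dict.empty := by
      unfold pvGroup
      congr 1
      funext acc index
      exact pv_stepB_eq info acc index
    rw [hA, hB]
    set dA := pvGroup info (fun index v => v ++ [index]) idxs PySem.Dict.empty with hdA
    set dB := pvGroup info (fun index v => pvB_insort index v) idxs PySem.Dict.empty with hdB
    have hkeq : dA.keys = dB.keys := pvGroup_keys info _ _ idxs _ _ rfl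
    have hAnd : dA.keys.Nodup := pvGroup_nodup info _ idxs _ PySem.Dict.nodup_keys_empty
    have hBnd : dB.keys.Nodup := pvGroup_nodup info _ idxs _ PySem.Dict.nodup_keys_empty
    have hsub : ∀ k ∈ dA.keys, dA.contains k = true :=
      fun k hk => (PySem.Dict.contains_iff_mem_keys _ _).2 hk
    obtain ⟨hRkeys, hRgetD⟩ := pv_resort dA.keys dA hAnd hsub
    set R := dA.keys.foldl (fun (acc : PySem.Dict String (List String)) scene_id =>
        acc.insert scene_id (PySem.List.sorted (acc.getD scene_id []) (fun x => x))) dA with hR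
    have hRnd : R.keys.Nodup := by rw [hRkeys]; exact hAnd
    rw [PySem.Dict.items_eq_map_keys R hRnd [], PySem.Dict.items_eq_map_keys dB hBnd []]
    rw [hRkeys, ← hkeq]
    apply List.map_congr_left
    intro k hk
    rw [hRgetD k, if_pos hk]
    have hAv : dA.getD k [] = idxs.filter (fun x => pvOk info x == some k) := by
      rw [hdA]
      rw [pvGroup_getD]
      rw [PySem.Dict.getD_empty]
      exact pv_append_fold _
    have hBv : dB.getD k [] = PySem.List.sorted (idxs.filter (fun x => pvOk info x == some k)) (fun x => x) := by
      rw [hdB, pvGroup_getD, PySem.Dict.getD_empty]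
      exact pv_insort_fold _
    rw [hAv, hBv]
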